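-- pv_equiv track=rewrite | github.com/Agv01/Sintaxis | Parser.py | automataParentesisAbre
-- ===== SOURCE A (Python) =====
-- ESTADO_FINAL = "ESTADO FINAL"
--
-- ESTADO_NO_FINAL = "NO ACEPTADO"
--
-- ESTADO_TRAMPA = "EN ESTADO TRAMPA"
--
-- def automataParentesisAbre(lexema):
--     estado = 0
--     estadoFinal = [1]
--     for caracter in lexema:
--         if estado == 0 and caracter == "(":
--             estado = 1
--         else:
--             estado = -1
--             break
--     if estado == -1:
--         return ESTADO_TRAMPA
--     elif estado in estadoFinal:
--         return ESTADO_FINAL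
--     else:
--         return ESTADO_NO_FINAL
-- ===== SOURCE B (Python) =====
-- ESTADO_FINAL = "ESTADO FINAL"
--
-- ESTADO_NO_FINAL = "NO ACEPTADO"
--
-- ESTADO_TRAMPA = "EN ESTADO TRAMPA"
--
-- def automataParentesisAbre(lexema):
--     if lexema == "(":
--         return ESTADO_FINAL
--     if lexema == "":
--         return ESTADO_NO_FINAL
--     return ESTADO_TRAMPA
-- ===== Notes on version B (the rewrite author's own statement) =====
-- stated objective: simpler
-- what changed: Replaced the per-character DFA loop over the string with three direct whole-string comparisons (the automaton only accepts the exact string '(').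
import Mathlib
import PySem

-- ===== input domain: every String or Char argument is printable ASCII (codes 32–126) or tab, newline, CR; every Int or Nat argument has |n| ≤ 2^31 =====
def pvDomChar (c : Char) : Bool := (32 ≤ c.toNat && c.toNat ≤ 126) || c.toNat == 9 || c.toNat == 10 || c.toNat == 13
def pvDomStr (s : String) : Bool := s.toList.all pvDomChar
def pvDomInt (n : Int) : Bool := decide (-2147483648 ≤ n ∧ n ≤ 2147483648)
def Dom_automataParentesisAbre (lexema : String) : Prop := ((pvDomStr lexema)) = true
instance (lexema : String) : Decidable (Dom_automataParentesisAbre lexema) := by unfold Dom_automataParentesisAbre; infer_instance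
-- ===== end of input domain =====

-- ===== PORT A =====
-- B replaces A's per-character DFA loop with direct whole-string comparisons (simpler).
def pvEstadoFinal : String := "ESTADO FINAL"
def pvEstadoNoFinal : String := "NO ACEPTADO"
def pvEstadoTrampa : String := "EN ESTADO TRAMPA"

-- the for-loop with its break: state is Int; -1 means the break was taken
def pvLoopA : List Char → Int → Int
  | [], estado => estado
  | c :: cs, estado =>
    if estado == 0 && c == '(' then pvLoopA cs 1
    else -1

def automataParentesisAbre (lexema : String) : String :=
  let estado := pvLoopA lexema.toList 0
  if estado = -1 then pvEstadoTrampa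
  else if estado ∈ [(1 : Int)] then pvEstadoFinal
  else pvEstadoNoFinal

-- ===== PORT B =====
def automataParentesisAbre_alt (lexema : String) : String :=
  if lexema = "(" then pvEstadoFinal
  else if lexema = "" then pvEstadoNoFinal
  else pvEstadoTrampa

-- ===== PRECONDITION & SPEC =====
def Spec_automataParentesisAbre (lexema : String) (out : String) : Prop := out = automataParentesisAbre_alt lexema
instance (lexema : String) (out : String) : Decidable (Spec_automataParentesisAbre lexema out) := by unfold Spec_automataParentesisAbre; infer_instance

-- ===== CLAIM (what is proved, stated in full; the proofs are below) =====
def Claim_equal_automataParentesisAbre : Prop := ∀ (lexema : String), Dom_automataParentesisAbre lexema → Spec_automataParentesisAbre lexema (automataParentesisAbre lexema)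

-- ===== LEMMAS AND PROOFS =====
theorem pvString_eq_iff_toList (s t : String) : s = t ↔ s.toList = t.toList := by
  constructor
  · intro h; rw [h]
  · intro h; exact String.ext (by simpa using h)

-- ===== VERDICT (by name: the statement is the Claim_ definition above) =====
theorem automataParentesisAbre_spec : Claim_equal_automataParentesisAbre := by
  intro lexema _
  unfold Spec_automataParentesisAbre automataParentesisAbre automataParentesisAbre_alt
  simp only [pvString_eq_iff_toList]
  match h : lexema.toList with
  | [] => simp [pvLoopA]
  | [c] =>
    by_cases hc : c = '('
    · subst hc; simp [pvLoopA]
    · simp [pvLoopA, hc]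
  | c :: d :: rest =>
    by_cases hc : c = '('
    · subst hc; simp [pvLoopA]
    · simp [pvLoopA, hc]
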